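-- pv_equiv track=rewrite | github.com/ReillySam/Python | QuickSort.py | get_colours
-- ===== SOURCE A (Python) =====
-- def get_colours(data, head, tail, border, curr_idx, is_swapping = False):
--     colour_array = []
--     for i in range(len(data)):
--         if i >= head and i <= tail:
--             colour_array.append('white')
--         else:
--             colour_array.append('pink')
--
--         if i == tail:
--             colour_array[i] = 'yellow'
--         elif i == border:
--             colour_array[i] = 'blue'
--         elif i == curr_idx:
--             colour_array[i] = 'red'
--
--         if is_swapping:
--             if i == border or i == curr_idx:
--                 colour_array[i] = 'lime'
--     return colour_array
-- ===== SOURCE B (Python) =====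
-- def get_colours(data, head, tail, border, curr_idx, is_swapping=False):
--     n = len(data)
--     lo = max(min(head, n), 0)
--     hi = max(min(tail + 1, n), lo)
--     arr = ['pink'] * lo + ['white'] * (hi - lo) + ['pink'] * (n - hi)
--     for idx, colour in ((curr_idx, 'red'), (border, 'blue'), (tail, 'yellow')):
--         if 0 <= idx < n:
--             arr[idx] = colour
--     if is_swapping:
--         for idx in (border, curr_idx):
--             if 0 <= idx < n:
--                 arr[idx] = 'lime'
--     return arr
-- ===== Notes on version B (the rewrite author's own statement) =====
-- stated objective: alternative
-- what changed: Replaces A's single loop with a per-index condition cascade by a bulk three-segment fill (pink/white/pink with clamped bounds) followed by a constant number of guarded direct index writes in priority order (red, blue, yellow, then lime).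
import Mathlib
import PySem

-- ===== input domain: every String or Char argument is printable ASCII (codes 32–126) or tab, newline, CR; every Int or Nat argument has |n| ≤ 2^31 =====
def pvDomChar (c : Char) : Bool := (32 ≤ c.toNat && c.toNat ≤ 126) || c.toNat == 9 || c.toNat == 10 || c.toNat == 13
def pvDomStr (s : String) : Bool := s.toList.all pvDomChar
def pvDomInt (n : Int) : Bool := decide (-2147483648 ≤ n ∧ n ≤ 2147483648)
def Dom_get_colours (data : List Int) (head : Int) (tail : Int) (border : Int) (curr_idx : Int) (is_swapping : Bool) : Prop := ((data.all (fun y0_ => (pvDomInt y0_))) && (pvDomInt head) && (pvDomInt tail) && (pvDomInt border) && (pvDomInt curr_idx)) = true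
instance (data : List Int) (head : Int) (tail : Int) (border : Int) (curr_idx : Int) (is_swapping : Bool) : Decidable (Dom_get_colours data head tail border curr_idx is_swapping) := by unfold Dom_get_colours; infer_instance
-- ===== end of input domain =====

-- B replaces A's per-index condition cascade by a bulk segment fill plus a constant
-- number of guarded direct index writes (alternative decomposition, same O(n) cost).

-- ===== PORT A =====
-- literal transliteration of A's loop: append the base colour, then overwrite slot i
-- via the elif chain, then the is_swapping override
def get_colours (data : List Int) (head : Int) (tail : Int) (border : Int) (curr_idx : Int) (is_swapping : Bool) : List String :=
  (List.range data.length).foldl (fun (colour_array : List String) (i : Nat) =>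
    let a1 := colour_array ++ [if head ≤ (i : Int) ∧ (i : Int) ≤ tail then "white" else "pink"]
    let a2 := if (i : Int) = tail then a1.set i "yellow"
              else if (i : Int) = border then a1.set i "blue"
              else if (i : Int) = curr_idx then a1.set i "red"
              else a1
    if is_swapping then
      (if (i : Int) = border ∨ (i : Int) = curr_idx then a2.set i "lime" else a2)
    else a2) []

-- ===== PORT B =====
-- Source B's bulk fill: ['pink'] * lo + ['white'] * (hi - lo) + ['pink'] * (n - hi)
def pvBase (head : Int) (tail : Int) (n : Int) : List String :=
  let lo := max (min head n) 0
  let hi := max (min (tail + 1) n) lo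
  List.replicate lo.toNat "pink" ++ List.replicate (hi - lo).toNat "white"
    ++ List.replicate (n - hi).toNat "pink"

-- Source B's guarded direct index write: arr[idx] = c only when 0 <= idx < n
def pvSetIf (arr : List String) (n : Int) (idx : Int) (c : String) : List String :=
  if 0 ≤ idx ∧ idx < n then arr.set idx.toNat c else arr

def get_colours_alt (data : List Int) (head : Int) (tail : Int) (border : Int) (curr_idx : Int) (is_swapping : Bool) : List String :=
  let n : Int := data.length
  let arr2 := pvSetIf (pvBase head tail n) n curr_idx "red"
  let arr3 := pvSetIf arr2 n border "blue"
  let arr4 := pvSetIf arr3 n tail "yellow"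
  if is_swapping then pvSetIf (pvSetIf arr4 n border "lime") n curr_idx "lime" else arr4

-- ===== PRECONDITION & SPEC =====
def Spec_get_colours (data : List Int) (head : Int) (tail : Int) (border : Int) (curr_idx : Int) (is_swapping : Bool) (out : List String) : Prop := out = get_colours_alt data head tail border curr_idx is_swapping
instance (data : List Int) (head : Int) (tail : Int) (border : Int) (curr_idx : Int) (is_swapping : Bool) (out : List String) : Decidable (Spec_get_colours data head tail border curr_idx is_swapping out) := by unfold Spec_get_colours; infer_instance

-- ===== CLAIM (what is proved, stated in full; the proofs are below) =====
def Claim_equal_get_colours : Prop := ∀ (data : List Int) (head : Int) (tail : Int) (border : Int) (curr_idx : Int) (is_swapping : Bool), Dom_get_colours data head tail border curr_idx is_swapping → Spec_get_colours data head tail border curr_idx is_swapping (get_colours data head tail border curr_idx is_swapping)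

-- ===== LEMMAS AND PROOFS =====

-- the colour A's loop assigns to slot i
def pvCol (head tail border curr_idx : Int) (is_swapping : Bool) (i : Nat) : String :=
  let base := if head ≤ (i : Int) ∧ (i : Int) ≤ tail then "white" else "pink"
  let c := if (i : Int) = tail then "yellow"
           else if (i : Int) = border then "blue"
           else if (i : Int) = curr_idx then "red"
           else base
  if is_swapping ∧ ((i : Int) = border ∨ (i : Int) = curr_idx) then "lime" else c

theorem pv_set_last {α : Type} (l : List α) (a b : α) :
    (l ++ [a]).set l.length b = l ++ [b] := by
  induction l with
  | nil => rfl
  | cons x xs ih => simp [ih]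

theorem pvA_eq_map (data : List Int) (head tail border curr_idx : Int) (is_swapping : Bool) :
    get_colours data head tail border curr_idx is_swapping
      = (List.range data.length).map (pvCol head tail border curr_idx is_swapping) := by
  unfold get_colours
  generalize data.length = n
  induction n with
  | zero => rfl
  | succ k ih =>
    rw [List.range_succ, List.foldl_append, ih, List.map_append, List.foldl_cons, List.foldl_nil]
    have hlen : ((List.range k).map (pvCol head tail border curr_idx is_swapping)).length = k := by
      simp
    have hset : ∀ (L : List String) (hL : L.length = k) (a b : String),
        (L ++ [a]).set k b = L ++ [b] := by
      intro L hL a b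
      rw [← hL]
      exact pv_set_last L a b
    cases is_swapping
    · simp only [pvCol, Bool.false_eq_true, false_and, if_false]
      split_ifs <;> simp [pvCol, hset _ hlen, *] <;> first | omega | (split_ifs <;> first | rfl | omega)
    · simp only [pvCol, show (true = true) = True from by simp, true_and, if_true]
      split_ifs <;> simp [pvCol, hset _ hlen, *] <;> first | omega | (split_ifs <;> first | rfl | omega)

theorem pvSetIf_length (arr : List String) (n idx : Int) (c : String) :
    (pvSetIf arr n idx c).length = arr.length := by
  unfold pvSetIf; split <;> simp

theorem pvSetIf_getElem (arr : List String) (n idx : Int) (c : String) (i : Nat)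
    (h : i < (pvSetIf arr n idx c).length) :
    (pvSetIf arr n idx c)[i] =
      if 0 ≤ idx ∧ idx < n ∧ idx = (i : Int) then c
      else arr[i]'(by rw [← pvSetIf_length arr n idx c]; exact h) := by
  by_cases hg : 0 ≤ idx ∧ idx < n
  · simp only [pvSetIf, if_pos hg] at h ⊢
    rw [List.getElem_set]
    by_cases he : idx.toNat = i
    · rw [if_pos he, if_pos (by omega)]
    · rw [if_neg he, if_neg (by omega)]
  · simp only [pvSetIf, if_neg hg] at h ⊢
    rw [if_neg (by omega)]

theorem pvBase_def (head tail n : Int) :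
    pvBase head tail n
      = List.replicate (max (min head n) 0).toNat "pink"
        ++ List.replicate (max (min (tail + 1) n) (max (min head n) 0) - max (min head n) 0).toNat "white"
        ++ List.replicate (n - max (min (tail + 1) n) (max (min head n) 0)).toNat "pink" := rfl

theorem pvBase_length (head tail n : Int) (hn : 0 ≤ n) :
    (pvBase head tail n).length = n.toNat := by
  rw [pvBase_def]
  simp only [List.length_append, List.length_replicate]
  omega

theorem pvBase_getElem (head tail n : Int) (i : Nat) (h : i < (pvBase head tail n).length) :
    (pvBase head tail n)[i]
      = if head ≤ (i : Int) ∧ (i : Int) ≤ tail then "white" else "pink" := by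
  simp only [pvBase_def] at h ⊢
  simp only [List.length_append, List.length_replicate] at h
  simp only [List.getElem_append, List.getElem_replicate, List.length_append, List.length_replicate]
  split_ifs <;> first | rfl | omega

def pvChain4 (data : List Int) (head tail border curr_idx : Int) : List String :=
  pvSetIf (pvSetIf (pvSetIf (pvBase head tail (data.length : Int)) (data.length : Int) curr_idx "red")
    (data.length : Int) border "blue") (data.length : Int) tail "yellow"

theorem pvAlt_false (data : List Int) (head tail border curr_idx : Int) :
    get_colours_alt data head tail border curr_idx false
      = pvChain4 data head tail border curr_idx := rfl

theorem pvAlt_true (data : List Int) (head tail border curr_idx : Int) :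
    get_colours_alt data head tail border curr_idx true
      = pvSetIf (pvSetIf (pvChain4 data head tail border curr_idx) (data.length : Int) border "lime")
          (data.length : Int) curr_idx "lime" := rfl

theorem pvB_eq_map (data : List Int) (head tail border curr_idx : Int) (is_swapping : Bool) :
    get_colours_alt data head tail border curr_idx is_swapping
      = (List.range data.length).map (pvCol head tail border curr_idx is_swapping) := by
  cases is_swapping
  · rw [pvAlt_false]
    refine List.ext_getElem ?_ ?_
    · simp only [pvChain4, pvSetIf_length, List.length_map, List.length_range,
        pvBase_length head tail (data.length : Int) (by omega)]
      omega
    · intro i h1 h2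
      have hin : i < data.length := by simpa using h2
      simp only [List.getElem_map, List.getElem_range, pvChain4, pvSetIf_getElem, pvBase_getElem,
        pvCol, Bool.false_eq_true, false_and, if_false]
      split_ifs <;> first | rfl | omega
  · rw [pvAlt_true]
    refine List.ext_getElem ?_ ?_
    · simp only [pvChain4, pvSetIf_length, List.length_map, List.length_range,
        pvBase_length head tail (data.length : Int) (by omega)]
      omega
    · intro i h1 h2
      have hin : i < data.length := by simpa using h2
      simp only [List.getElem_map, List.getElem_range, pvChain4, pvSetIf_getElem, pvBase_getElem,
        pvCol, show (true = true) = True from by simp, true_and]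
      split_ifs <;> first | rfl | omega

-- ===== VERDICT (by name: the statement is the Claim_ definition above) =====
theorem get_colours_spec : Claim_equal_get_colours := by
  intro data head tail border curr_idx is_swapping _
  unfold Spec_get_colours
  rw [pvA_eq_map, pvB_eq_map]
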